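-- pv_equiv track=rewrite | github.com/DanielHara/leetcode-solutions | solutions/1616.py | makeDpArray
-- ===== SOURCE A (Python) =====
-- def makeDpArray(s: str):
--     dp = [None for char in s]
--     N = len(s)
--     half = N // 2 - 1 if N % 2 == 0 else N // 2
--
--     if N % 2 != 0:
--         dp[half] = True
--     else:
--         half = N // 2 - 1
--         dp[half] = (s[half] == s[half + 1])
--         dp[half + 1] = dp[half]
--
--     for position in range(half - 1, -1, -1):
--         dp[position] = dp[position + 1] and (s[position] == s[N - 1 - position])
--         dp[N - 1 - position] = dp[position]
--
--     return dp
-- ===== SOURCE B (Python) =====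
-- def makeDpArray(s: str):
--     N = len(s)
--     f = -1
--     for i in range(N // 2):
--         if s[i] != s[N - 1 - i]:
--             f = i
--     dp = [None] * N
--     for i in range(N // 2):
--         v = i > f
--         dp[i] = v
--         dp[N - 1 - i] = v
--     if N % 2 == 1:
--         dp[N // 2] = True
--     return dp
-- ===== Notes on version B (the rewrite author's own statement) =====
-- stated objective: simpler
-- what changed: A propagates a running AND outward from the center, mutating dp pairwise from the middle; B makes one left-half pass recording the last mismatch index f and then fills dp by the threshold test i > f (plus True at the odd center), so no boolean is propagated between cells.
import Mathlib
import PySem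

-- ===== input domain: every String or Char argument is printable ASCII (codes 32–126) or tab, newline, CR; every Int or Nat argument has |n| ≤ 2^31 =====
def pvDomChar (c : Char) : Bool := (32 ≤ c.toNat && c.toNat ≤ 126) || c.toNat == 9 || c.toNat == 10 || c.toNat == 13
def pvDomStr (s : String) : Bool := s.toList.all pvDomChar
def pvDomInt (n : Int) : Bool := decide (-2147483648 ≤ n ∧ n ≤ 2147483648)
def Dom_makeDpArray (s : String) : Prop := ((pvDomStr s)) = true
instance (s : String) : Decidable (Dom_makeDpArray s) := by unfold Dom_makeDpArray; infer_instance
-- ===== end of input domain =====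

-- B replaces A's center-outward running-AND propagation by one mismatch-scan of the left
-- half (tracking the last mismatch index f) followed by a threshold fill dp[i] = (i > f):
-- objective "simpler". Equality of return values is claimed for nonempty strings (Pre_).

-- ===== PORT A =====
-- the descending loop `for position in range(half - 1, -1, -1)`; fuel = position + 1.
-- Indices are in range on every input Pre_ admits, so Python's s[j] / dp[j] are ported
-- as getD with a junk default (exact there).
def aLoop (l : List Char) (N : Nat) : Nat → List (Option Bool) → List (Option Bool)
  | 0, dp => dp
  | p + 1, dp =>
      let prev := (dp.getD (p + 1) none).getD false
      let v : Option Bool := some (prev && (l.getD p ' ' == l.getD (N - 1 - p) ' '))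
      aLoop l N p ((dp.set p v).set (N - 1 - p) v)

def makeDpArray (s : String) : List (Option Bool) :=
  let l := s.toList
  let dp : List (Option Bool) := l.map (fun _ => none)
  let N := l.length
  if N % 2 ≠ 0 then
    let half := N / 2
    aLoop l N half (dp.set half (some true))
  else
    let half := N / 2 - 1
    let v : Option Bool := some (l.getD half ' ' == l.getD (half + 1) ' ')
    aLoop l N half ((dp.set half v).set (half + 1) v)

-- ===== PORT B =====
def makeDpArray_alt (s : String) : List (Option Bool) :=
  let l := s.toList
  let N := l.length
  let f : Int := (List.range (N / 2)).foldl
    (fun f (i : Nat) => if l.getD i ' ' ≠ l.getD (N - 1 - i) ' ' then (i : Int) else f) (-1)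
  let dp : List (Option Bool) := List.replicate N none
  let dp := (List.range (N / 2)).foldl
    (fun dp (i : Nat) =>
      let v : Option Bool := some (decide ((i : Int) > f))
      (dp.set i v).set (N - 1 - i) v) dp
  if N % 2 == 1 then dp.set (N / 2) (some true) else dp

-- ===== PRECONDITION & SPEC =====
-- Pre_ excludes only the empty string, on which A raises IndexError (dp[-1] on an empty list); B returns [] there.
def Pre_makeDpArray (s : String) : Prop := s ≠ ""
instance (s : String) : Decidable (Pre_makeDpArray s) := by unfold Pre_makeDpArray; infer_instance
def pvWitness_makeDpArray : String := "abca"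

def Spec_makeDpArray (s : String) (out : List (Option Bool)) : Prop := out = makeDpArray_alt s
instance (s : String) (out : List (Option Bool)) : Decidable (Spec_makeDpArray s out) := by unfold Spec_makeDpArray; infer_instance

-- ===== CLAIM (what is proved, stated in full; the proofs are below) =====
def Claim_equal_makeDpArray : Prop := ∀ (s : String), Dom_makeDpArray s → Pre_makeDpArray s → Spec_makeDpArray s (makeDpArray s)
-- ===== LEMMAS AND PROOFS =====

-- mtc l j: the characters at mirror positions j and (length-1-j) agree
def mtc (l : List Char) (j : Nat) : Bool := l.getD j ' ' == l.getD (l.length - 1 - j) ' '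

-- g l j: every left-half position ≥ j matches its mirror (the common value of both dp's)
def g (l : List Char) (j : Nat) : Bool :=
  decide (∀ k, j ≤ k → k < l.length / 2 → mtc l k = true)

-- named forms of B's two loop bodies (definitionally equal to the port's lambdas)
def fStep (l : List Char) (f : Int) (i : Nat) : Int :=
  if l.getD i ' ' ≠ l.getD (l.length - 1 - i) ' ' then (i : Int) else f
def fF (l : List Char) (t : Nat) : Int := (List.range t).foldl (fStep l) (-1)
def bStep (l : List Char) (f : Int) (dp : List (Option Bool)) (i : Nat) : List (Option Bool) :=
  (dp.set i (some (decide ((i : Int) > f)))).set (l.length - 1 - i) (some (decide ((i : Int) > f)))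
def bFold (l : List Char) (t : Nat) : List (Option Bool) :=
  (List.range t).foldl (bStep l (fF l (l.length / 2))) (List.replicate l.length none)

theorem alt_eq (s : String) :
    makeDpArray_alt s =
      if s.toList.length % 2 == 1 then
        (bFold s.toList (s.toList.length / 2)).set (s.toList.length / 2) (some true)
      else bFold s.toList (s.toList.length / 2) := rfl

theorem g_ge (l : List Char) (j : Nat) (h : l.length / 2 ≤ j) : g l j = true := by
  simp only [g, decide_eq_true_iff]
  intro k hk hk2; omega

theorem g_succ (l : List Char) (j : Nat) (h : j < l.length / 2) :
    g l j = (g l (j + 1) && mtc l j) := by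
  have hiff : (∀ k, j ≤ k → k < l.length / 2 → mtc l k = true)
      ↔ ((∀ k, j + 1 ≤ k → k < l.length / 2 → mtc l k = true) ∧ mtc l j = true) := by
    constructor
    · intro hall; exact ⟨fun k hk hk2 => hall k (by omega) hk2, hall j le_rfl h⟩
    · rintro ⟨h2, h1⟩ k hk hk2
      rcases Nat.eq_or_lt_of_le hk with rfl | hk'
      · exact h1
      · exact h2 k hk' hk2
  have hiff' : decide (∀ k, j ≤ k → k < l.length / 2 → mtc l k = true)
      = decide ((∀ k, j + 1 ≤ k → k < l.length / 2 → mtc l k = true) ∧ mtc l j = true) :=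
    decide_eq_decide.mpr hiff
  simp only [g]
  rw [hiff']
  by_cases h1 : mtc l j = true <;>
    by_cases h2 : ∀ k, j + 1 ≤ k → k < l.length / 2 → mtc l k = true <;>
      simp [g, h1, h2]

theorem fF_succ (l : List Char) (t : Nat) : fF l (t + 1) = fStep l (fF l t) t := by
  rw [fF, fF, List.range_succ, List.foldl_append, List.foldl_cons, List.foldl_nil]

-- characterization of B's mismatch scan
theorem f_spec (l : List Char) (t : Nat) :
    (∀ i : Nat, ((i : Int) > fF l t ↔ ∀ k, i ≤ k → k < t → mtc l k = true))
    ∧ fF l t < (t : Int) := by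
  induction t with
  | zero =>
    refine ⟨fun i => ⟨fun _ k hk hk2 => by omega, fun _ => by simp [fF]; omega⟩, by simp [fF]⟩
  | succ t ih =>
    rw [fF_succ]
    unfold fStep
    by_cases hmtc : mtc l t = true
    · have hne : ¬ l.getD t ' ' ≠ l.getD (l.length - 1 - t) ' ' := by
        simpa [mtc, beq_iff_eq] using hmtc
      rw [if_neg hne]
      refine ⟨fun i => ⟨fun hf k hk hk2 => ?_, fun hall => ?_⟩, by omega⟩
      · rcases Nat.lt_succ_iff_lt_or_eq.mp hk2 with h | rfl
        · exact ((ih.1 i).mp hf) k hk h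
        · exact hmtc
      · exact (ih.1 i).mpr fun k hk hk2 => hall k hk (by omega)
    · have hne : l.getD t ' ' ≠ l.getD (l.length - 1 - t) ' ' := by
        simpa [mtc, beq_iff_eq] using hmtc
      rw [if_pos hne]
      refine ⟨fun i => ⟨fun hf k hk hk2 => ?_, fun hall => ?_⟩, by omega⟩
      · exact absurd hk2 (by omega)
      · by_contra hle
        have hle' : i ≤ t := by omega
        exact hne (by simpa [mtc, beq_iff_eq] using hall t hle' (by omega))

-- the threshold test of B's fill equals g
theorem fill_val (l : List Char) (i : Nat) :
    decide ((i : Int) > fF l (l.length / 2)) = g l i := by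
  have := (f_spec l (l.length / 2)).1 i
  simp only [g]
  exact decide_eq_decide.mpr this

theorem bFold_succ (l : List Char) (t : Nat) :
    bFold l (t + 1) = bStep l (fF l (l.length / 2)) (bFold l t) t := by
  rw [bFold, bFold, List.range_succ, List.foldl_append, List.foldl_cons, List.foldl_nil]

theorem bFold_length (l : List Char) (t : Nat) : (bFold l t).length = l.length := by
  induction t with
  | zero => simp [bFold]
  | succ t ih => rw [bFold_succ, bStep]; simp [ih]

-- elementwise characterization of B's fill loop
theorem bFold_getElem? (l : List Char) (t : Nat) :
    ∀ k, 2 * t ≤ l.length →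
    (bFold l t)[k]?
    = if k < t then some (some (g l k))
      else if k < l.length ∧ l.length ≤ t + k then some (some (g l (l.length - 1 - k)))
      else if k < l.length then some none else none := by
  induction t with
  | zero =>
    intro k _
    simp only [bFold, List.range_zero, List.foldl_nil, List.getElem?_replicate]
    have h1 : ¬ (k < 0) := by omega
    have h2 : ¬ (k < l.length ∧ l.length ≤ 0 + k) := by omega
    rw [if_neg h1, if_neg h2]
  | succ t ih =>
    intro k ht
    rw [bFold_succ, bStep, fill_val]
    rw [List.getElem?_set, List.getElem?_set]
    simp only [List.length_set, bFold_length]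
    rw [ih k (by omega)]
    have hmir : l.length - 1 - (l.length - 1 - t) = t := by omega
    split_ifs <;> first
      | rfl
      | omega
      | (congr 3; omega)
      | (congr 4; omega)
      | (subst_vars; rfl)
      | (exfalso; omega)

-- elementwise characterization of A's descending loop
theorem aLoop_getElem? (l : List Char) (p : Nat) :
    ∀ dp : List (Option Bool), 2 * p ≤ l.length → dp.length = l.length →
    dp.getD p none = some (g l p) → ∀ k,
    (aLoop l l.length p dp)[k]?
    = if k < p then some (some (g l k))
      else if k < l.length ∧ l.length ≤ p + k then some (some (g l (l.length - 1 - k)))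
      else dp[k]? := by
  induction p with
  | zero =>
    intro dp _ _ _ k
    simp only [aLoop]
    have : ¬ (k < l.length ∧ l.length ≤ 0 + k) := by omega
    simp [this]
  | succ p ih =>
    intro dp hp hlen hdp k
    rw [aLoop]
    have hg : (((dp.getD (p + 1) none).getD false) && (l.getD p ' ' == l.getD (l.length - 1 - p) ' '))
        = g l p := by
      rw [hdp, g_succ l p (by omega)]; rfl
    simp only [hg]
    have hdp' : ((dp.set p (some (g l p))).set (l.length - 1 - p) (some (g l p))).getD p none
        = some (g l p) := by
      have h1 : l.length - 1 - p ≠ p := by omega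
      have h2 : p < dp.length := by omega
      simp [List.getD_eq_getElem?_getD, List.getElem?_set, h1, h2]
    rw [ih ((dp.set p (some (g l p))).set (l.length - 1 - p) (some (g l p)))
      (by omega) (by simp [hlen]) hdp' k]
    rw [List.getElem?_set, List.getElem?_set]
    simp only [List.length_set, hlen]
    have hmir : l.length - 1 - (l.length - 1 - p) = p := by omega
    split_ifs <;> first
      | rfl
      | omega
      | (congr 3; omega)
      | (congr 4; omega)
      | (subst_vars; rfl)
      | (exfalso; omega)

-- both ports, in pure list form
theorem ports_eq (l : List Char) (hN : 1 ≤ l.length) :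
    (if l.length % 2 ≠ 0 then
       aLoop l l.length (l.length / 2) ((l.map fun _ => none).set (l.length / 2) (some true))
     else
       aLoop l l.length (l.length / 2 - 1)
         (((l.map fun _ => (none : Option Bool)).set (l.length / 2 - 1)
             (some (l.getD (l.length / 2 - 1) ' ' == l.getD (l.length / 2 - 1 + 1) ' '))).set
           (l.length / 2 - 1 + 1)
           (some (l.getD (l.length / 2 - 1) ' ' == l.getD (l.length / 2 - 1 + 1) ' '))))
    = (if l.length % 2 == 1 then (bFold l (l.length / 2)).set (l.length / 2) (some true)
       else bFold l (l.length / 2)) := by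
  have hm2 : 2 * (l.length / 2) ≤ l.length := by omega
  have hB := bFold_getElem? l (l.length / 2)
  simp only [List.map_const']
  by_cases hpar : l.length % 2 = 0
  · -- even length
    have hN2 : 2 ≤ l.length := by omega
    rw [if_neg (by omega : ¬ l.length % 2 ≠ 0),
        if_neg (by simp; omega : ¬ ((l.length % 2 == 1) = true))]
    have hmir : l.length - 1 - (l.length / 2 - 1) = l.length / 2 - 1 + 1 := by omega
    have hv : (l.getD (l.length / 2 - 1) ' ' == l.getD (l.length / 2 - 1 + 1) ' ')
        = g l (l.length / 2 - 1) := by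
      rw [g_succ l _ (by omega), g_ge l (l.length / 2 - 1 + 1) (by omega)]
      simp [mtc, hmir]
    rw [hv]
    have hdpA : (((List.replicate l.length (none : Option Bool)).set
          (l.length / 2 - 1) (some (g l (l.length / 2 - 1)))).set
          (l.length / 2 - 1 + 1) (some (g l (l.length / 2 - 1)))).getD
          (l.length / 2 - 1) none = some (g l (l.length / 2 - 1)) := by
      have h1 : l.length / 2 - 1 + 1 ≠ l.length / 2 - 1 := by omega
      have h2 : l.length / 2 - 1 < l.length := by omega
      simp [List.getD_eq_getElem?_getD, List.getElem?_set, h1, h2]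
    have hA := aLoop_getElem? l (l.length / 2 - 1) _ (by omega) (by simp) hdpA
    apply List.ext_getElem?
    intro n
    rw [hA n, hB n hm2]
    rw [List.getElem?_set, List.getElem?_set, List.getElem?_replicate]
    simp only [List.length_set, List.length_replicate]
    split_ifs <;> first
      | rfl
      | omega
      | (congr 3; omega)
      | (congr 4; omega)
      | (subst_vars; rfl)
      | (rw [show l.length - 1 - n = l.length / 2 - 1 from by omega])
      | (exfalso; omega)
  · -- odd length
    rw [if_pos (hpar : l.length % 2 ≠ 0),
        if_pos (by simp; omega : (l.length % 2 == 1) = true)]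
    have hmlt : l.length / 2 < l.length := by omega
    have hdpA : ((List.replicate l.length (none : Option Bool)).set
          (l.length / 2) (some true)).getD (l.length / 2) none
          = some (g l (l.length / 2)) := by
      rw [g_ge l _ le_rfl]
      simp [List.getD_eq_getElem?_getD, List.getElem?_set, hmlt]
    have hA := aLoop_getElem? l (l.length / 2) _ hm2 (by simp) hdpA
    apply List.ext_getElem?
    intro n
    rw [hA n, List.getElem?_set, List.getElem?_replicate, List.getElem?_set, bFold_length,
        hB n hm2]
    simp only [List.length_set, List.length_replicate]
    split_ifs <;> first
      | rfl
      | omega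
      | (congr 3; omega)
      | (congr 4; omega)
      | (subst_vars; rfl)
      | (rw [show l.length - 1 - n = l.length / 2 from by omega,
             g_ge l (l.length / 2) le_rfl])
      | (rw [g_ge l (l.length / 2) le_rfl,
             show l.length - 1 - n = l.length / 2 from by omega])
      | (exfalso; omega)

-- ===== VERDICT (by name: the statement is the Claim_ definition above) =====
theorem makeDpArray_spec : Claim_equal_makeDpArray := by
  intro s _ hpre
  unfold Spec_makeDpArray
  have hl : s.toList ≠ [] := fun h => hpre (String.toList_eq_nil_iff.mp h)
  have hN : 1 ≤ s.toList.length := by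
    cases hc : s.toList with
    | nil => exact absurd hc hl
    | cons a as => simp [hc]
  rw [alt_eq, ← ports_eq s.toList hN]
  rfl
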